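-- pv_equiv track=rewrite | github.com/cdf144/python-practice | leetcode/dynamic-programming.py | getLengthOfOptimalCompression
-- ===== SOURCE A (Python) =====
-- import collections
-- import math
--
-- def getLengthOfOptimalCompression(s: str, k: int) -> int:
--     def get_compressed_length(freq: int) -> int:
--         if freq == 1:
--             return 1
--         if freq < 10:
--             return 2
--         if freq < 100:
--             return 3
--         return 4
--
--     length = len(s)
--     lookup_table = {}
--
--     def dp(i: int, curr_k: int) -> int:
--         if (i, curr_k) in lookup_table:
--             return lookup_table[(i, curr_k)]
--         # Invalid call
--         if curr_k < 0:
--             return 101  # inf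
--         # If substring is empty or its length is
--         # lower than k (can be all deleted)
--         if i == length or length - i <= curr_k:
--             return 0
--
--         # Our priority will be to keep letters with high frequency in the
--         # string and remove the singular letters with the goal of grouping
--         # the repeated letters together, making compression efficient
--         max_freq = 0
--         counter = collections.Counter()
--         result = math.inf
--
--         for j in range(i, length):
--             counter[s[j]] += 1
--             max_freq = max(max_freq, counter[s[j]])
--             result = min(
--                 result,
--                 get_compressed_length(max_freq) + dp(
--                     j + 1, curr_k - (j - i + 1 - max_freq)
--                 )
--             )
--
--         lookup_table[(i, curr_k)] = result
--         return result
--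
--     return dp(0, k)
-- ===== SOURCE B (Python) =====
-- import math
--
--
-- def getLengthOfOptimalCompression(s: str, k: int) -> int:
--     # Bottom-up tabulation instead of top-down memoized recursion; the character
--     # scan of each window is hoisted out of the budget loop and done once per i.
--     def get_compressed_length(freq: int) -> int:
--         if freq == 1:
--             return 1
--         if freq < 10:
--             return 2
--         if freq < 100:
--             return 3
--         return 4
--
--     if k < 0:
--         return 101  # negative deletion budget: the "inf"-like sentinel
--     n = len(s)
--     if k >= n:
--         return 0  # everything can be deleted
--
--     # rows[d] is the dp row for start index i+1+d while filling row i;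
--     # rows is seeded with the row for i == n (empty suffix: all zeros).
--     rows = [[0] * (k + 1)]
--     for i in range(n - 1, -1, -1):
--         # one scan of the window starts at i: for each end j, the compressed
--         # length of the majority run and the deletions needed to keep it
--         cnt = {}
--         maxf = 0
--         costs = []
--         for j in range(i, n):
--             cnt[s[j]] = cnt.get(s[j], 0) + 1
--             maxf = max(maxf, cnt[s[j]])
--             costs.append((get_compressed_length(maxf), j - i + 1 - maxf))
--         row = []
--         for ck in range(k + 1):
--             if n - i <= ck:
--                 row.append(0)
--                 continue
--             best = math.inf
--             for t, (g, dl) in enumerate(costs):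
--                 rem = ck - dl
--                 nxt = 101 if rem < 0 else rows[t][rem]
--                 best = min(best, g + nxt)
--             row.append(best)
--         rows.insert(0, row)
--     return rows[0][k]
-- ===== Notes on version B (the rewrite author's own statement) =====
-- stated objective: alternative
-- what changed: Replaces A's top-down memoized recursion (dp(i,curr_k) with a lookup_table) by bottom-up tabulation: dp rows for start indices n..0 are built iteratively, with the window character scan hoisted out of the budget loop (done once per start index), table lookups with a 101 sentinel for negative remaining budget, and early returns for k<0 and k>=len(s).
import Mathlib
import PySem

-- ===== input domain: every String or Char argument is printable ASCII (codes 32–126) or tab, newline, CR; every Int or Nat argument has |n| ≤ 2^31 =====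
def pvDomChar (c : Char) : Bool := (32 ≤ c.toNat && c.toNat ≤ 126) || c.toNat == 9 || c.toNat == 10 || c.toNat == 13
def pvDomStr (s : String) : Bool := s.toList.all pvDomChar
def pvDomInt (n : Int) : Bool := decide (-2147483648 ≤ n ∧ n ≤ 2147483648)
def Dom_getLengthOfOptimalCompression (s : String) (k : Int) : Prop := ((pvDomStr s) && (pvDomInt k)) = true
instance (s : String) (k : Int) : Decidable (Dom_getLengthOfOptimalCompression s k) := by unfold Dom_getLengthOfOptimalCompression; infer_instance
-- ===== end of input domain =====

-- B replaces A's top-down memoized recursion by bottom-up row-by-row tabulation (alternative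
-- decomposition, same asymptotic cost); A's return value only is compared (A mutates no argument).

-- ===== PORT A =====
-- get_compressed_length helper of A
def pyGCL (freq : Int) : Int :=
  if freq = 1 then 1 else if freq < 10 then 2 else if freq < 100 then 3 else 4

-- math.inf, used only as the initial value of `result`/`best`: strictly larger than any
-- finite value ever compared against it, so `min` behaves exactly as with float('inf').
def pyINF : Int := 4611686018427387904

-- A's dp(i, curr_k) with its inner `for j in range(i, length)` loop as loopA.
-- The memo table `lookup_table` is a semantically transparent cache of this pure recursion
-- and is dropped; cs.getD j ' ' is exact for s[j] since it is only evaluated for j < length.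
mutual
def dpA (cs : List Char) (n i : Nat) (ck : Int) : Int :=
  if ck < 0 then 101
  else if i = n ∨ (n : Int) - (i : Int) ≤ ck then 0
  else loopA cs n i ck i PySem.Dict.empty 0 pyINF
termination_by (n - i, 1)

def loopA (cs : List Char) (n i : Nat) (ck : Int) (j : Nat)
    (d : PySem.Dict Char Int) (maxf res : Int) : Int :=
  if h : j < n then
    let c := cs.getD j ' '
    let cnt := d.getD c 0 + 1
    let maxf' := max maxf cnt
    let res' := min res (pyGCL maxf' + dpA cs n (j + 1) (ck - ((j : Int) - (i : Int) + 1 - maxf')))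
    loopA cs n i ck (j + 1) (d.insert c cnt) maxf' res'
  else res
termination_by (n - j, 0)
end

def getLengthOfOptimalCompression (s : String) (k : Int) : Int :=
  dpA s.toList s.toList.length 0 k

-- ===== PORT B =====
-- B's get_compressed_length (same text as A's helper)
def pyGCLB (freq : Int) : Int :=
  if freq = 1 then 1 else if freq < 10 then 2 else if freq < 100 then 3 else 4

-- B's per-start-index window scan (`for j in range(i, n)` building `costs`): for each window
-- end j it records (get_compressed_length(maxf), deletions needed to keep the majority char).
def scanB (cs : List Char) (n i j : Nat) (d : PySem.Dict Char Int) (maxf : Int) :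
    List (Int × Int) :=
  if h : j < n then
    let c := cs.getD j ' '
    let cnt := d.getD c 0 + 1
    let maxf' := max maxf cnt
    (pyGCLB maxf', (j : Int) - (i : Int) + 1 - maxf') :: scanB cs n i (j + 1) (d.insert c cnt) maxf'
  else []
termination_by n - j

-- B's `for t, (g, dl) in enumerate(costs)` loop (the enumerate counter is the explicit t);
-- `rows` holds the already-computed dp rows for start indices i+1 .. n, so dp[j+1][rem] is rows[t][rem].
def bestB (rows : List (List Int)) (ck : Int) : List (Int × Int) → Nat → Int → Int
  | [], _, best => best
  | (g, dl) :: rest, t, best =>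
    let rem := ck - dl
    let nxt := if rem < 0 then 101 else (rows.getD t []).getD rem.toNat 0
    bestB rows ck rest (t + 1) (min best (g + nxt))

-- one dp row for start index i: entries for ck = 0 .. kk
def rowB (cs : List Char) (n : Nat) (rows : List (List Int)) (i kk : Nat) : List Int :=
  let costs := scanB cs n i i PySem.Dict.empty 0
  (List.range (kk + 1)).map (fun (ck : Nat) =>
    if (n : Int) - (i : Int) ≤ (ck : Int) then 0
    else bestB rows (ck : Int) costs 0 pyINF)

def getLengthOfOptimalCompression_alt (s : String) (k : Int) : Int :=
  if k < 0 then 101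
  else
    let cs := s.toList
    let n := cs.length
    if (n : Int) ≤ k then 0
    else
      let kk := k.toNat
      let rows := (List.range n).foldl
        (fun rows t => rowB cs n rows (n - 1 - t) kk :: rows)
        [List.replicate (kk + 1) 0]
      (rows.getD 0 []).getD kk 0

-- ===== PRECONDITION & SPEC =====
def Spec_getLengthOfOptimalCompression (s : String) (k : Int) (out : Int) : Prop := out = getLengthOfOptimalCompression_alt s k
instance (s : String) (k : Int) (out : Int) : Decidable (Spec_getLengthOfOptimalCompression s k out) := by unfold Spec_getLengthOfOptimalCompression; infer_instance

-- ===== CLAIM (what is proved, stated in full; the proofs are below) =====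
def Claim_equal_getLengthOfOptimalCompression : Prop := ∀ (s : String) (k : Int), Dom_getLengthOfOptimalCompression s k → Spec_getLengthOfOptimalCompression s k (getLengthOfOptimalCompression s k)

-- ===== LEMMAS AND PROOFS =====

lemma loop_eq (cs : List Char) (n i : Nat) (kk : Nat) (rows : List (List Int))
    (H : ∀ (j : Nat) (r : Int), i ≤ j → j < n → 0 ≤ r → r ≤ (kk : Int) →
      ((rows.getD (j - i) []).getD r.toNat 0) = dpA cs n (j + 1) r)
    (ck : Int) (hck : ck ≤ (kk : Int)) :
    ∀ (m j : Nat) (d : PySem.Dict Char Int) (maxf res : Int),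
      n - j = m → i ≤ j →
      (∀ c, d.getD c 0 ≤ (j : Int) - (i : Int)) → maxf ≤ (j : Int) - (i : Int) →
      loopA cs n i ck j d maxf res = bestB rows ck (scanB cs n i j d maxf) (j - i) res := by
  intro m
  induction m with
  | zero =>
    intro j d maxf res hm _ _ _
    rw [loopA, scanB, dif_neg (show ¬ j < n by omega), dif_neg (show ¬ j < n by omega)]
    rfl
  | succ m ih =>
    intro j d maxf res hm hij hd hmf
    have hjn : j < n := by omega
    rw [loopA, scanB, dif_pos hjn, dif_pos hjn]
    show loopA cs n i ck (j + 1) (d.insert (cs.getD j ' ') (d.getD (cs.getD j ' ') 0 + 1))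
          (max maxf (d.getD (cs.getD j ' ') 0 + 1))
          (min res (pyGCL (max maxf (d.getD (cs.getD j ' ') 0 + 1)) +
            dpA cs n (j + 1) (ck - ((j : Int) - (i : Int) + 1 - max maxf (d.getD (cs.getD j ' ') 0 + 1)))))
        = bestB rows ck
            ((pyGCLB (max maxf (d.getD (cs.getD j ' ') 0 + 1)),
              (j : Int) - (i : Int) + 1 - max maxf (d.getD (cs.getD j ' ') 0 + 1)) ::
             scanB cs n i (j + 1) (d.insert (cs.getD j ' ') (d.getD (cs.getD j ' ') 0 + 1))
               (max maxf (d.getD (cs.getD j ' ') 0 + 1)))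
            (j - i) res
    rw [bestB]
    have hcnt : d.getD (cs.getD j ' ') 0 + 1 ≤ (j : Int) - (i : Int) + 1 := by
      have := hd (cs.getD j ' '); omega
    have hmf' : max maxf (d.getD (cs.getD j ' ') 0 + 1) ≤ ((j + 1 : Nat) : Int) - (i : Int) := by
      push_cast; omega
    have hnxt :
        (if ck - ((j : Int) - (i : Int) + 1 - max maxf (d.getD (cs.getD j ' ') 0 + 1)) < 0 then (101 : Int)
         else (rows.getD (j - i) []).getD (ck - ((j : Int) - (i : Int) + 1 - max maxf (d.getD (cs.getD j ' ') 0 + 1))).toNat 0)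
        = dpA cs n (j + 1) (ck - ((j : Int) - (i : Int) + 1 - max maxf (d.getD (cs.getD j ' ') 0 + 1))) := by
      set rem := ck - ((j : Int) - (i : Int) + 1 - max maxf (d.getD (cs.getD j ' ') 0 + 1)) with hrem
      by_cases hneg : rem < 0
      · rw [if_pos hneg, dpA, if_pos hneg]
      · rw [if_neg hneg]
        have h0 : 0 ≤ rem := by omega
        have hle : rem ≤ (kk : Int) := by
          have : max maxf (d.getD (cs.getD j ' ') 0 + 1) ≤ (j : Int) - (i : Int) + 1 := by omega
          omega
        exact H j rem hij hjn h0 hle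
    rw [show pyGCLB = pyGCL from rfl, hnxt]
    have := ih (j + 1) (d.insert (cs.getD j ' ') (d.getD (cs.getD j ' ') 0 + 1))
      (max maxf (d.getD (cs.getD j ' ') 0 + 1))
      (min res (pyGCL (max maxf (d.getD (cs.getD j ' ') 0 + 1)) +
        dpA cs n (j + 1) (ck - ((j : Int) - (i : Int) + 1 - max maxf (d.getD (cs.getD j ' ') 0 + 1)))))
      (by omega) (by omega)
      (by
        intro c'
        rw [PySem.Dict.getD_insert]
        split
        · push_cast; omega
        · have := hd c'; push_cast; omega)
      hmf'
    rw [this, show j + 1 - i = j - i + 1 by omega]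

lemma row_entry (cs : List Char) (n : Nat) (rows : List (List Int)) (i kk : Nat)
    (hin : i < n)
    (H : ∀ (j : Nat) (r : Int), i ≤ j → j < n → 0 ≤ r → r ≤ (kk : Int) →
      ((rows.getD (j - i) []).getD r.toNat 0) = dpA cs n (j + 1) r)
    (ck : Nat) (hck : ck ≤ kk) :
    (rowB cs n rows i kk).getD ck 0 = dpA cs n i (ck : Int) := by
  have hmem : (rowB cs n rows i kk).getD ck 0 =
      (if (n : Int) - (i : Int) ≤ (ck : Int) then 0
       else bestB rows (ck : Int) (scanB cs n i i PySem.Dict.empty 0) 0 pyINF) := by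
    unfold rowB
    rw [List.getD_eq_getElem?_getD, List.getElem?_map,
      List.getElem?_range (show ck < kk + 1 by omega)]
    rfl
  rw [hmem, dpA]
  have hck0 : ¬ ((ck : Int) < 0) := by omega
  rw [if_neg hck0]
  by_cases hbase : (n : Int) - (i : Int) ≤ (ck : Int)
  · rw [if_pos hbase, if_pos (Or.inr hbase)]
  · rw [if_neg hbase, if_neg (show ¬ (i = n ∨ (n : Int) - (i : Int) ≤ (ck : Int)) by omega)]
    symm
    have := loop_eq cs n i kk rows H (ck : Int) (by exact_mod_cast hck) (n - i) i
      PySem.Dict.empty 0 pyINF rfl (by omega)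
      (by intro c; simp [PySem.Dict.getD_empty]) (by simp)
    rw [this, Nat.sub_self]

lemma table_valid (cs : List Char) (n kk : Nat) :
    ∀ (t : Nat), t ≤ n → ∀ (dd : Nat), dd ≤ t → ∀ (c : Nat), c ≤ kk →
      ((((List.range t).foldl (fun rows u => rowB cs n rows (n - 1 - u) kk :: rows)
          [List.replicate (kk + 1) 0]).getD dd []).getD c 0)
        = dpA cs n (n - t + dd) (c : Int) := by
  intro t
  induction t with
  | zero =>
    intro _ dd hdd c hc
    interval_cases dd
    simp only [List.range_zero, List.foldl_nil, List.getD_cons_zero]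
    rw [List.getD_eq_getElem?_getD]
    simp [show c < kk + 1 by omega]
    rw [dpA]
    rw [if_neg (show ¬ ((c : Int) < 0) by omega), if_pos (Or.inl (by omega))]
  | succ t ih =>
    intro ht dd hdd c hc
    rw [List.range_succ, List.foldl_append, List.foldl_cons, List.foldl_nil]
    have H : ∀ (j : Nat) (r : Int), n - 1 - t ≤ j → j < n → 0 ≤ r → r ≤ (kk : Int) →
        ((((List.range t).foldl (fun rows u => rowB cs n rows (n - 1 - u) kk :: rows)
            [List.replicate (kk + 1) 0]).getD (j - (n - 1 - t)) []).getD r.toNat 0)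
          = dpA cs n (j + 1) r := by
      intro j r hij hjn h0 hr
      have h1 : j - (n - 1 - t) ≤ t := by omega
      have h2 : r.toNat ≤ kk := by omega
      have := ih (by omega) (j - (n - 1 - t)) h1 r.toNat h2
      rw [this]
      congr 1
      · omega
      · omega
    cases dd with
    | zero =>
      rw [List.getD_cons_zero]
      have := row_entry cs n _ (n - 1 - t) kk (by omega) H c hc
      rw [this]
      congr 1
      omega
    | succ dd' =>
      rw [List.getD_cons_succ]
      have := ih (by omega) dd' (by omega) c hc
      rw [this]
      congr 1
      omega

-- ===== VERDICT (by name: the statement is the Claim_ definition above) =====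
theorem getLengthOfOptimalCompression_spec : Claim_equal_getLengthOfOptimalCompression := by
  intro s k _
  unfold Spec_getLengthOfOptimalCompression getLengthOfOptimalCompression getLengthOfOptimalCompression_alt
  by_cases hk : k < 0
  · rw [dpA, if_pos hk, if_pos hk]
  · rw [if_neg hk]
    set cs := s.toList with hcs
    set n := cs.length with hn
    by_cases hkn : (n : Int) ≤ k
    · rw [if_pos hkn, dpA]
      rw [if_neg hk]
      rcases Nat.eq_zero_or_pos n with h0 | h0
      · rw [if_pos (Or.inl (by omega))]
      · rw [if_pos (Or.inr (by push_cast; omega))]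
    · rw [if_neg hkn]
      have h0k : 0 ≤ k := by omega
      have := table_valid cs n k.toNat n (le_refl n) 0 (by omega) k.toNat (le_refl _)
      simp only at this ⊢
      rw [this]
      congr 1
      · omega
      · omega
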